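-- pv_equiv track=rewrite | github.com/AlifSrSE/ProblemSolves | 236B-easyNumberChallenge.py | solve
-- ===== SOURCE A (Python) =====
-- def solve(a, b, c):
--     mod_number = 1073741824
--     max_prod = a * b * c
--     divisors = [1] * (max_prod + 1)
--     for k in range(2, max_prod + 1):
--         divisors[k] = 2
--
--     for k in range(2, max_prod // 2 + 1):
--         for m in range(2 * k, max_prod + 1, k):
--             divisors[m] += 1
--
--     total_sum = 0
--     for first in range(1, a + 1):
--         for second in range(1, b + 1):
--             product = first * second
--             for third in range(1, c + 1):
--                 current_number = product * third
--                 total_sum += divisors[current_number]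
--                 if total_sum >= mod_number:
--                     total_sum -= mod_number
--     return total_sum
-- ===== SOURCE B (Python) =====
-- def solve(a, b, c):
--     mod_number = 1073741824
--     total = 0
--     for i in range(1, a + 1):
--         for j in range(1, b + 1):
--             for k in range(1, c + 1):
--                 m = i * j * k
--                 cnt = 0
--                 d = 1
--                 while d * d < m:
--                     if m % d == 0:
--                         cnt += 2
--                     d += 1
--                 if d * d == m:
--                     cnt += 1
--                 total += cnt
--                 if total >= mod_number:
--                     total -= mod_number
--     return total
-- ===== Notes on version B (the rewrite author's own statement) =====
-- stated objective: alternative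
-- what changed: B drops A's global O(a*b*c)-sized divisor table (the replicate pass, the init-to-2 pass and the multiples sieve) and instead counts each product's divisors directly in divisor pairs (d, m/d) with d up to sqrt(m), using O(1) extra memory.
import Mathlib
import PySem

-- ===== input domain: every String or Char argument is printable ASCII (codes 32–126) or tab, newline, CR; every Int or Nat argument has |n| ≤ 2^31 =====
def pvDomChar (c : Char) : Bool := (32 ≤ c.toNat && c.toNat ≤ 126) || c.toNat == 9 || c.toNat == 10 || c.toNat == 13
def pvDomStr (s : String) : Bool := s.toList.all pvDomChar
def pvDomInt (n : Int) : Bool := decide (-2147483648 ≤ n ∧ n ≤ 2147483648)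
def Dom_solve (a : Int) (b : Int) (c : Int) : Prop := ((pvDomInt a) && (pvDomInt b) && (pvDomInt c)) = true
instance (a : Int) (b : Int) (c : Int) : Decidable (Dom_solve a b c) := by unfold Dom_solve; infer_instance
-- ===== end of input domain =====

-- B replaces A's global sieve-built divisor table by direct pair-counting of each product's
-- divisors up to its square root (alternative algorithm, O(1) extra memory; not claimed faster).


-- ===== PORT A =====
-- A-side helper: A's statements building the `divisors` table ([1]*(max_prod+1), the
-- init-to-2 pass, the multiples sieve), transliterated statement by statement.
def solveTable (max_prod : Int) : List Int :=
  let divisors := PySem.List.pyRepeat [(1 : Int)] (max_prod + 1)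
  let divisors := (PySem.List.pyRange 2 (max_prod + 1) 1).foldl
    (fun d k => PySem.List.pySetD d k 2) divisors
  (PySem.List.pyRange 2 (PySem.Int.floordiv max_prod 2 + 1) 1).foldl
    (fun d k => (PySem.List.pyRange (2 * k) (max_prod + 1) k).foldl
      (fun d m => PySem.List.pySetD d m (PySem.List.pyGetD d m 0 + 1)) d) divisors

def solve (a : Int) (b : Int) (c : Int) : Int :=
  let mod_number : Int := 1073741824
  let max_prod := a * b * c
  let divisors := solveTable max_prod
  (PySem.List.pyRange 1 (a + 1) 1).foldl (fun total_sum first =>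
    (PySem.List.pyRange 1 (b + 1) 1).foldl (fun total_sum second =>
      let product := first * second
      (PySem.List.pyRange 1 (c + 1) 1).foldl (fun total_sum third =>
        let current_number := product * third
        let total_sum := total_sum + PySem.List.pyGetD divisors current_number 0
        if total_sum ≥ mod_number then total_sum - mod_number else total_sum) total_sum)
      total_sum) 0

-- ===== PORT B =====
-- B-side helper: Source B's inner `while d * d < m:` loop (state d, cnt) followed by the
-- `if d * d == m: cnt += 1` boundary check at loop exit.
def sqrtCount (m : Int) (d : Int) (cnt : Int) : Int :=
  if d * d < m then
    sqrtCount m (d + 1) (if PySem.Int.mod m d == 0 then cnt + 2 else cnt)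
  else if d * d == m then cnt + 1 else cnt
termination_by (m - d).toNat
decreasing_by
  rename_i h
  have hdm : d < m := by nlinarith [sq_nonneg (d - 1)]
  omega

def solve_alt (a : Int) (b : Int) (c : Int) : Int :=
  let mod_number : Int := 1073741824
  (PySem.List.pyRange 1 (a + 1) 1).foldl (fun total i =>
    (PySem.List.pyRange 1 (b + 1) 1).foldl (fun total j =>
      (PySem.List.pyRange 1 (c + 1) 1).foldl (fun total k =>
        let m := i * j * k
        let cnt := sqrtCount m 1 0
        let total := total + cnt
        if total ≥ mod_number then total - mod_number else total) total) total) 0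

-- ===== PRECONDITION & SPEC =====
-- Pre_ excludes exactly the inputs on which A raises: when the repetition count a*b*c + 1
-- does not fit the machine ssize_t (outside [-2^63, 2^63 - 1]), the allocation
-- [1]*(a*b*c+1) raises OverflowError ("cannot fit 'int' into an index-sized integer");
-- everywhere else A's loops are well-defined (non-positive bounds just make them empty).
def Pre_solve (a : Int) (b : Int) (c : Int) : Prop :=
  -9223372036854775808 ≤ a * b * c + 1 ∧ a * b * c + 1 ≤ 9223372036854775807
instance (a : Int) (b : Int) (c : Int) : Decidable (Pre_solve a b c) := by unfold Pre_solve; infer_instance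

def pvWitness_solve : Int × Int × Int := (2, 2, 2)

def Spec_solve (a : Int) (b : Int) (c : Int) (out : Int) : Prop := out = solve_alt a b c
instance (a : Int) (b : Int) (c : Int) (out : Int) : Decidable (Spec_solve a b c out) := by unfold Spec_solve; infer_instance

-- ===== CLAIM (what is proved, stated in full; the proofs are below) =====
def Claim_equal_solve : Prop := ∀ (a : Int) (b : Int) (c : Int), Dom_solve a b c → Pre_solve a b c → Spec_solve a b c (solve a b c)

-- ===== LEMMAS AND PROOFS =====

-- Proof-side reference quantity: the full trial-division divisor count of m
-- (number of d in 1..m dividing m); both ports' per-product values are reduced to it.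
def countDivs (m : Int) : Int :=
  (PySem.List.pyRange 1 (m + 1) 1).foldl
    (fun cnt d => if PySem.Int.mod m d == 0 then cnt + 1 else cnt) 0

lemma getD_set_ir (xs : List Int) (i j : Nat) (v : Int) (hj : j < xs.length) :
    (xs.set i v).getD j 0 = if i = j then v else xs.getD j 0 := by
  rcases eq_or_ne i j with rfl | hne
  · simp [List.getD_eq_getElem?_getD, hj]
  · simp [List.getD_eq_getElem?_getD, List.getElem?_set_ne hne, hne]

lemma getD_setpass (ls : List Int) (d0 : List Int) (j : Int) (h0 : 0 ≤ j)
    (hpos : ∀ x ∈ ls, 0 ≤ x) (hj : j.toNat < d0.length) :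
    PySem.List.pyGetD (ls.foldl (fun d k => PySem.List.pySetD d k (2 : Int)) d0) j 0
      = if j ∈ ls then 2 else PySem.List.pyGetD d0 j 0 := by
  induction ls generalizing d0 with
  | nil => simp
  | cons x t ih =>
    have hx : 0 ≤ x := hpos x (by simp)
    have hlen : j.toNat < (PySem.List.pySetD d0 x 2).length := by
      rw [PySem.List.length_pySetD]; exact hj
    rw [List.foldl_cons, ih _ (fun y hy => hpos y (by simp [hy])) hlen]
    rw [PySem.List.pySetD_of_nonneg _ _ hx, PySem.List.pyGetD_of_nonneg _ _ h0,
        PySem.List.pyGetD_of_nonneg _ _ h0, getD_set_ir _ _ _ _ hj]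
    have hiff : x.toNat = j.toNat ↔ x = j := by omega
    by_cases hmem : j ∈ t
    · simp [hmem]
    · by_cases hxj : x = j
      · simp [hmem, hxj]
      · have : ¬ x.toNat = j.toNat := fun h => hxj (hiff.mp h)
        simp [hmem, this, Ne.symm hxj]

lemma getD_incpass (ls : List Int) (d0 : List Int) (j : Int) (h0 : 0 ≤ j)
    (hpos : ∀ x ∈ ls, 0 ≤ x) (hj : j.toNat < d0.length) :
    PySem.List.pyGetD (ls.foldl (fun d m => PySem.List.pySetD d m (PySem.List.pyGetD d m 0 + 1)) d0) j 0
      = PySem.List.pyGetD d0 j 0 + (ls.count j : Int) := by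
  induction ls generalizing d0 with
  | nil => simp
  | cons x t ih =>
    have hx : 0 ≤ x := hpos x (by simp)
    have hlen : j.toNat < (PySem.List.pySetD d0 x (PySem.List.pyGetD d0 x 0 + 1)).length := by
      rw [PySem.List.length_pySetD]; exact hj
    rw [List.foldl_cons, ih _ (fun y hy => hpos y (by simp [hy])) hlen]
    rw [PySem.List.pySetD_of_nonneg _ _ hx, PySem.List.pyGetD_of_nonneg _ _ h0,
        PySem.List.pyGetD_of_nonneg _ _ h0, getD_set_ir _ _ _ _ hj]
    have hiff : x.toNat = j.toNat ↔ x = j := by omega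
    by_cases hxj : x = j
    · subst hxj
      rw [if_pos rfl, List.count_cons_self, PySem.List.pyGetD_of_nonneg _ _ hx]
      push_cast; ring
    · have : ¬ x.toNat = j.toNat := fun h => hxj (hiff.mp h)
      rw [if_neg this]
      simp [List.count_cons]
      exact hxj

lemma len_incpass (ls : List Int) (d0 : List Int) :
    (ls.foldl (fun d m => PySem.List.pySetD d m (PySem.List.pyGetD d m 0 + 1)) d0).length
      = d0.length := by
  induction ls generalizing d0 with
  | nil => rfl
  | cons x t ih => simp [List.foldl_cons, ih, PySem.List.length_pySetD]

lemma getD_sieve (n : Int) (ks : List Int) (d0 : List Int) (j : Int) (h0 : 0 ≤ j)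
    (hpos : ∀ k ∈ ks, 1 ≤ k) (hj : j.toNat < d0.length) :
    PySem.List.pyGetD (ks.foldl
        (fun d k => (PySem.List.pyRange (2 * k) (n + 1) k).foldl
          (fun d m => PySem.List.pySetD d m (PySem.List.pyGetD d m 0 + 1)) d) d0) j 0
      = PySem.List.pyGetD d0 j 0
        + ((ks.map (fun k => ((PySem.List.pyRange (2 * k) (n + 1) k).count j : Int))).sum) := by
  induction ks generalizing d0 with
  | nil => simp
  | cons k t ih =>
    have hk : (1:Int) ≤ k := hpos k (by simp)
    have hmempos : ∀ x ∈ PySem.List.pyRange (2 * k) (n + 1) k, (0:Int) ≤ x := by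
      intro x hx
      have := (PySem.List.mem_pyRange_iff_of_pos (by omega) x).mp hx
      omega
    have hlen : j.toNat < ((PySem.List.pyRange (2 * k) (n + 1) k).foldl
        (fun d m => PySem.List.pySetD d m (PySem.List.pyGetD d m 0 + 1)) d0).length := by
      rw [len_incpass]; exact hj
    rw [List.foldl_cons, ih _ (fun y hy => hpos y (by simp [hy])) hlen,
        getD_incpass _ _ _ h0 hmempos hj]
    simp; ring

lemma count_pyRange_pos (x lo hi s : Int) (hs : 0 < s) :
    ((PySem.List.pyRange lo hi s).count x : Int)
      = if x ∈ PySem.List.pyRange lo hi s then 1 else 0 := by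
  have hnd : (PySem.List.pyRange lo hi s).Nodup := by
    rw [PySem.List.pyRange_of_pos _ _ hs]
    refine List.Nodup.map ?_ (List.nodup_range)
    intro p q hpq
    have : (p:Int) = q := by nlinarith [hpq]
    exact_mod_cast this
  split_ifs with h
  · exact_mod_cast List.count_eq_one_of_mem hnd h
  · simp [List.count_eq_zero_of_not_mem h]

lemma dvd_sub_two (k j : Int) : (k ∣ j - 2*k) ↔ k ∣ j := by
  constructor
  · intro h; have := dvd_add h (dvd_mul_left k 2); simpa using this
  · intro h; exact dvd_sub h (dvd_mul_left k 2)

lemma div_upper (k j : Int) (hk2 : 2 ≤ k) (hkj : k < j) (h : k ∣ j) : 2*k ≤ j := by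
  rcases h with ⟨q, rfl⟩
  have hq : 2 ≤ q := by nlinarith
  nlinarith

lemma len_setpass (ls : List Int) (d0 : List Int) :
    (ls.foldl (fun d k => PySem.List.pySetD d k (2 : Int)) d0).length = d0.length := by
  induction ls generalizing d0 with
  | nil => rfl
  | cons x t ih => simp [List.foldl_cons, ih, PySem.List.length_pySetD]

lemma table_getD (n j : Int) (h1 : 1 ≤ j) (hn : j ≤ n) :
    PySem.List.pyGetD (solveTable n) j 0 = countDivs j := by
  have h0 : (0:Int) ≤ j := by omega
  have hn1 : (1:Int) ≤ n := le_trans h1 hn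
  have hjlen : j.toNat < (List.replicate (n+1).toNat (1:Int)).length := by
    simp [List.length_replicate]; omega
  unfold solveTable
  simp only [PySem.List.pyRepeat_singleton]
  set d0 : List Int := List.replicate (n+1).toNat (1:Int) with hd0
  set d1 : List Int := (PySem.List.pyRange 2 (n+1) 1).foldl (fun d k => PySem.List.pySetD d k 2) d0 with hd1
  have hlen1 : j.toNat < d1.length := by rw [hd1, len_setpass]; exact hjlen
  rw [getD_sieve n _ d1 j h0
      (fun k hk => by have := (PySem.List.mem_pyRange_one).mp hk; omega) hlen1]
  rw [hd1, getD_setpass _ _ _ h0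
      (fun x hx => by have := (PySem.List.mem_pyRange_one).mp hx; omega) hjlen]
  have hbase : PySem.List.pyGetD d0 j 0 = 1 := by
    rw [PySem.List.pyGetD_of_nonneg _ _ h0, hd0, List.getD_replicate _ (by omega)]
  rw [hbase]
  have hmap : ∀ k ∈ PySem.List.pyRange 2 (PySem.Int.floordiv n 2 + 1) 1,
      ((PySem.List.pyRange (2*k) (n+1) k).count j : Int)
        = if (decide (2*k ≤ j ∧ k ∣ j)) = true then 1 else 0 := by
    intro k hk
    have hk2 : (2:Int) ≤ k := ((PySem.List.mem_pyRange_one).mp hk).1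
    rw [count_pyRange_pos _ _ _ _ (by omega)]
    have hmem : j ∈ PySem.List.pyRange (2*k) (n+1) k ↔ (2*k ≤ j ∧ k ∣ j) := by
      rw [PySem.List.mem_pyRange_iff_of_pos (by omega)]
      constructor
      · rintro ⟨hA, hB, hC⟩; exact ⟨hA, (dvd_sub_two k j).mp hC⟩
      · rintro ⟨hA, hB⟩; exact ⟨hA, by omega, (dvd_sub_two k j).mpr hB⟩
    simp [hmem]
  rw [List.map_congr_left hmap, PySem.List.sum_map_ite_one_zero]
  unfold countDivs
  rw [PySem.List.foldl_if_add_one (fun d => PySem.Int.mod j d == 0)]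
  by_cases hj2 : (2:Int) ≤ j
  · -- main case
    have hfd : PySem.Int.floordiv n 2 = n / 2 := PySem.Int.floordiv_eq_ediv_of_pos (by omega)
    rw [hfd]
    have hmemj : j ∈ PySem.List.pyRange 2 (n+1) 1 := (PySem.List.mem_pyRange_one).mpr ⟨hj2, by omega⟩
    rw [if_pos hmemj]
    have hsplitB : PySem.List.pyRange 1 (j+1) 1 = 1 :: (PySem.List.pyRange 2 j 1 ++ [j]) := by
      rw [PySem.List.pyRange_one_cons (by omega : (1:Int) < j+1)]
      norm_num
      rw [PySem.List.pyRange_one_succ_right (by omega : (2:Int) ≤ j)]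
    rw [hsplitB]
    have hp1 : (PySem.Int.mod j 1 == 0) = true := by
      simp
    have hpj : (PySem.Int.mod j j == 0) = true := by
      simp [beq_iff_eq, PySem.Int.mod_eq_zero_iff_dvd]
    have htail1 : ∀ l' : List Int, (∀ k ∈ l', j < 2*k) →
        List.countP (fun k => decide (2*k ≤ j ∧ k ∣ j)) l' = 0 := by
      intro l' hl'
      refine List.countP_eq_zero.mpr ?_
      intro k hk hq
      simp only [decide_eq_true_eq] at hq
      have := hl' k hk; omega
    have hstep1 : List.countP (fun k => decide (2*k ≤ j ∧ k ∣ j)) (PySem.List.pyRange 2 (n/2+1) 1)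
        = List.countP (fun k => decide (2*k ≤ j ∧ k ∣ j)) (PySem.List.pyRange 2 (j+1) 1) := by
      rcases le_total (j+1) (n/2+1) with hle | hlt
      · rw [PySem.List.pyRange_one_append 2 (j+1) (n/2+1) (by omega) hle, List.countP_append,
            htail1 (PySem.List.pyRange (j+1) (n/2+1) 1)
              (fun k hk => by have := (PySem.List.mem_pyRange_one).mp hk; omega)]
        simp
      · rw [PySem.List.pyRange_one_append 2 (n/2+1) (j+1) (by omega) hlt, List.countP_append,
            htail1 (PySem.List.pyRange (n/2+1) (j+1) 1)
              (fun k hk => by have := (PySem.List.mem_pyRange_one).mp hk; omega)]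
        simp
    have hstep2 : List.countP (fun k => decide (2*k ≤ j ∧ k ∣ j)) (PySem.List.pyRange 2 (j+1) 1)
        = List.countP (fun k => decide (2*k ≤ j ∧ k ∣ j)) (PySem.List.pyRange 2 j 1) := by
      rw [PySem.List.pyRange_one_succ_right (by omega : (2:Int) ≤ j), List.countP_append]
      have : List.countP (fun k => decide (2*k ≤ j ∧ k ∣ j)) [j] = 0 := by
        refine List.countP_eq_zero.mpr ?_
        intro k hk hq
        simp only [List.mem_singleton] at hk
        subst hk
        simp only [decide_eq_true_eq] at hq
        omega
      rw [this]
      simp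
    have hstep3 : List.countP (fun k => decide (2*k ≤ j ∧ k ∣ j)) (PySem.List.pyRange 2 j 1)
        = List.countP (fun d => PySem.Int.mod j d == 0) (PySem.List.pyRange 2 j 1) := by
      refine List.countP_congr ?_
      intro k hk
      have hb := (PySem.List.mem_pyRange_one).mp hk
      simp only [decide_eq_true_eq, beq_iff_eq, PySem.Int.mod_eq_zero_iff_dvd]
      constructor
      · rintro ⟨_, h⟩; exact h
      · intro h; exact ⟨div_upper k j hb.1 (by omega) h, h⟩
    rw [hstep1, hstep2, hstep3]
    rw [List.countP_cons, List.countP_append]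
    simp only [List.countP_cons, List.countP_nil, hp1, hpj, if_true]
    push_cast; ring
  · -- j = 1
    have hj1 : j = 1 := by omega
    subst hj1
    have hc0 : List.countP (fun k => decide (2*k ≤ (1:Int) ∧ k ∣ 1)) (PySem.List.pyRange 2 (PySem.Int.floordiv n 2 + 1) 1) = 0 := by
      refine List.countP_eq_zero.mpr ?_
      intro k hk hq
      have := (PySem.List.mem_pyRange_one).mp hk
      simp only [decide_eq_true_eq] at hq
      omega
    rw [hc0]
    norm_num
    decide

-- ---- countDivs m = card of the divisor Finset of m.toNat ----

lemma countP_dvd_Ico (m : Int) (hm : 1 ≤ m) : ∀ (N : Int), 1 ≤ N →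
    ((PySem.List.pyRange 1 N 1).countP (fun d => PySem.Int.mod m d == 0) : Int)
      = (((Finset.Ico 1 N.toNat).filter (fun x => x ∣ m.toNat)).card : Int) := by
  intro N hN
  induction N, hN using Int.le_induction with
  | base =>
    rw [PySem.List.pyRange_one_eq_nil (by omega)]
    simp
  | succ N hN ih =>
    rw [PySem.List.pyRange_one_succ_right (by omega), List.countP_append]
    have hNt : (N+1).toNat = N.toNat + 1 := by omega
    have h1N : 1 ≤ N.toNat := by omega
    rw [hNt, Nat.Ico_succ_right_eq_insert_Ico h1N, Finset.filter_insert]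
    have hcN : (N.toNat : Int) = N := by omega
    have hcm : (m.toNat : Int) = m := by omega
    have hiff : (PySem.Int.mod m N == 0) = true ↔ N.toNat ∣ m.toNat := by
      rw [beq_iff_eq, PySem.Int.mod_eq_zero_iff_dvd]
      rw [← Int.natCast_dvd_natCast, hcN, hcm]
    by_cases hd : N.toNat ∣ m.toNat
    · have hb : (PySem.Int.mod m N == 0) = true := hiff.mpr hd
      rw [if_pos hd, Finset.card_insert_of_notMem (by simp)]
      simp only [List.countP_cons, List.countP_nil, hb, if_true]
      push_cast
      rw [ih]
    · have hb : ¬ (PySem.Int.mod m N == 0) = true := fun h => hd (hiff.mp h)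
      rw [if_neg hd]
      simp only [List.countP_cons, List.countP_nil, hb]
      push_cast
      rw [ih]
      ring

lemma countDivs_eq_card (m : Int) (hm : 1 ≤ m) :
    countDivs m = ((m.toNat.divisors).card : Int) := by
  unfold countDivs
  rw [PySem.List.foldl_if_add_one (fun d => PySem.Int.mod m d == 0), zero_add]
  rw [countP_dvd_Ico m hm (m+1) (by omega)]
  have h : (m+1).toNat = m.toNat + 1 := by omega
  rw [h, Nat.divisors]

lemma sqrtCount_inv (m : Int) (hm : 1 ≤ m) : ∀ (k : Nat) (d cnt : Int), (m - d).toNat = k → 1 ≤ d →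
    sqrtCount m d cnt = cnt
      + 2 * ((((m.toNat.divisors).filter (fun x => d.toNat ≤ x ∧ x*x < m.toNat)).card : Int))
      + ((((m.toNat.divisors).filter (fun x => d.toNat ≤ x ∧ x*x = m.toNat)).card : Int)) := by
  intro k
  induction k using Nat.strong_induction_on with
  | _ k ih =>
    intro d cnt hk hd
    have hcd : (d.toNat : Int) = d := by omega
    have hcm : (m.toNat : Int) = m := by omega
    rw [sqrtCount]
    by_cases hlt : d * d < m
    · rw [if_pos hlt]
      have hdm : d < m := by nlinarith [sq_nonneg (d - 1)]
      have hrec := ih (m - (d+1)).toNat (by omega) (d+1)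
        (if PySem.Int.mod m d == 0 then cnt + 2 else cnt) rfl (by omega)
      rw [hrec]
      have hd1 : (d+1).toNat = d.toNat + 1 := by omega
      have hsqNat : d.toNat * d.toNat < m.toNat := by
        have : ((d.toNat * d.toNat : Nat) : Int) < ((m.toNat : Nat) : Int) := by
          push_cast; rw [hcd, hcm]; exact hlt
        exact_mod_cast this
      -- (i) the boundary filter is unchanged
      have hC : (m.toNat.divisors).filter (fun x => (d+1).toNat ≤ x ∧ x*x = m.toNat)
          = (m.toNat.divisors).filter (fun x => d.toNat ≤ x ∧ x*x = m.toNat) := by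
        rw [hd1]
        refine Finset.filter_congr ?_
        intro x hx
        constructor
        · rintro ⟨h1, h2⟩; exact ⟨by omega, h2⟩
        · rintro ⟨h1, h2⟩
          refine ⟨?_, h2⟩
          rcases Nat.eq_or_lt_of_le h1 with he | hlt2
          · exfalso; rw [← he] at h2; omega
          · omega
      -- (ii) the strict filter splits off x = d.toNat
      have hsplit : (m.toNat.divisors).filter (fun x => d.toNat ≤ x ∧ x*x < m.toNat)
          = ((m.toNat.divisors).filter (fun x => x = d.toNat))
            ∪ ((m.toNat.divisors).filter (fun x => (d+1).toNat ≤ x ∧ x*x < m.toNat)) := by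
        rw [hd1]
        ext x
        simp only [Finset.mem_union, Finset.mem_filter]
        constructor
        · rintro ⟨hxd, h1, h2⟩
          rcases Nat.eq_or_lt_of_le h1 with he | hlt2
          · exact Or.inl ⟨hxd, he.symm⟩
          · exact Or.inr ⟨hxd, by omega, h2⟩
        · rintro (⟨hxd, he⟩ | ⟨hxd, h1, h2⟩)
          · subst he; exact ⟨hxd, le_refl _, hsqNat⟩
          · exact ⟨hxd, by omega, h2⟩
      have hdisj : Disjoint ((m.toNat.divisors).filter (fun x => x = d.toNat))
          ((m.toNat.divisors).filter (fun x => (d+1).toNat ≤ x ∧ x*x < m.toNat)) := by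
        rw [hd1]
        rw [Finset.disjoint_left]
        intro x hx1 hx2
        simp only [Finset.mem_filter] at hx1 hx2
        omega
      have hcardsplit : ((m.toNat.divisors).filter (fun x => d.toNat ≤ x ∧ x*x < m.toNat)).card
          = ((m.toNat.divisors).filter (fun x => x = d.toNat)).card
            + ((m.toNat.divisors).filter (fun x => (d+1).toNat ≤ x ∧ x*x < m.toNat)).card := by
        rw [hsplit, Finset.card_union_of_disjoint hdisj]
      have hsingle : ((m.toNat.divisors).filter (fun x => x = d.toNat)).card
          = if PySem.Int.mod m d == 0 then 1 else 0 := by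
        rw [Finset.filter_eq']
        have hmemiff : d.toNat ∈ m.toNat.divisors ↔ (PySem.Int.mod m d == 0) = true := by
          rw [Nat.mem_divisors, beq_iff_eq, PySem.Int.mod_eq_zero_iff_dvd]
          constructor
          · rintro ⟨h1, _⟩
            have : (d.toNat : Int) ∣ (m.toNat : Int) := Int.natCast_dvd_natCast.mpr h1
            rwa [hcd, hcm] at this
          · intro h
            refine ⟨?_, by omega⟩
            rw [← Int.natCast_dvd_natCast, hcd, hcm]; exact h
        by_cases hb : (PySem.Int.mod m d == 0) = true
        · rw [if_pos (hmemiff.mpr hb), if_pos hb]; simp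
        · rw [if_neg (fun h => hb (hmemiff.mp h)), if_neg hb]; simp
      rw [hC, hcardsplit, hsingle]
      by_cases hb : (PySem.Int.mod m d == 0) = true
      · rw [if_pos hb, if_pos hb]; push_cast; ring
      · rw [if_neg hb, if_neg hb]; push_cast; ring
    · rw [if_neg hlt]
      have hge : m ≤ d * d := by omega
      have hgeNat : m.toNat ≤ d.toNat * d.toNat := by
        have : ((m.toNat : Nat) : Int) ≤ ((d.toNat * d.toNat : Nat) : Int) := by
          push_cast; rw [hcd, hcm]; exact hge
        exact_mod_cast this
      have hA0 : ((m.toNat.divisors).filter (fun x => d.toNat ≤ x ∧ x*x < m.toNat)).card = 0 := by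
        rw [Finset.card_eq_zero]
        refine Finset.filter_eq_empty_iff.mpr ?_
        rintro x hx ⟨h1, h2⟩
        have : d.toNat * d.toNat ≤ x * x := Nat.mul_le_mul h1 h1
        omega
      rw [hA0]
      by_cases heq : d * d = m
      · have hbeq : (d * d == m) = true := beq_iff_eq.mpr heq
        rw [if_pos hbeq]
        have heqNat : d.toNat * d.toNat = m.toNat := by
          have h' : ((d.toNat * d.toNat : Nat) : Int) = ((m.toNat : Nat) : Int) := by
            push_cast; rw [hcd, hcm]; exact heq
          exact_mod_cast h'
        have hC1 : ((m.toNat.divisors).filter (fun x => d.toNat ≤ x ∧ x*x = m.toNat)) = {d.toNat} := by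
          ext x
          simp only [Finset.mem_filter, Finset.mem_singleton, Nat.mem_divisors]
          constructor
          · rintro ⟨_, h1, h2⟩
            rcases Nat.eq_or_lt_of_le h1 with he | hlt2
            · omega
            · exfalso
              have : (d.toNat + 1) * (d.toNat + 1) ≤ x * x := Nat.mul_le_mul hlt2 hlt2
              nlinarith
          · rintro rfl
            refine ⟨⟨⟨d.toNat, heqNat.symm⟩, by omega⟩, le_refl _, heqNat⟩
        rw [hC1]
        simp
      · have hbeq : ¬ (d * d == m) = true := fun h => heq (beq_iff_eq.mp h)
        rw [if_neg hbeq]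
        have hne : m.toNat ≠ d.toNat * d.toNat := by
          intro h'
          apply heq
          have h'' : ((m.toNat : Nat) : Int) = ((d.toNat * d.toNat : Nat) : Int) := by
            exact_mod_cast h'
          push_cast at h''
          rw [hcd, hcm] at h''
          omega
        have hgt : m.toNat < d.toNat * d.toNat := by omega
        have hC0 : ((m.toNat.divisors).filter (fun x => d.toNat ≤ x ∧ x*x = m.toNat)).card = 0 := by
          rw [Finset.card_eq_zero]
          refine Finset.filter_eq_empty_iff.mpr ?_
          rintro x hx ⟨h1, h2⟩
          have : d.toNat * d.toNat ≤ x * x := Nat.mul_le_mul h1 h1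
          omega
        rw [hC0]
        simp

lemma card_lt_eq_card_gt (n : Nat) (hn : 1 ≤ n) :
    ((n.divisors).filter (fun x => x*x < n)).card
      = ((n.divisors).filter (fun x => n < x*x)).card := by
  refine Finset.card_nbij' (fun x => n / x) (fun x => n / x) ?_ ?_ ?_ ?_
  · intro a ha
    simp only [Finset.mem_coe, Finset.mem_filter, Nat.mem_divisors] at ha ⊢
    obtain ⟨⟨⟨q, hq⟩, hn0⟩, haa⟩ := ha
    have ha1 : 1 ≤ a := by
      rcases Nat.eq_zero_or_pos a with h0 | h1
      · subst h0; simp at hq; omega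
      · exact h1
    have hqa : n / a = q := by rw [hq, Nat.mul_div_cancel_left _ (by omega)]
    rw [hqa]
    have haq : a < q := by nlinarith
    refine ⟨⟨⟨a, by rw [hq, Nat.mul_comm]⟩, hn0⟩, by nlinarith⟩
  · intro b hb
    simp only [Finset.mem_coe, Finset.mem_filter, Nat.mem_divisors] at hb ⊢
    obtain ⟨⟨⟨q, hq⟩, hn0⟩, hbb⟩ := hb
    have hb1 : 1 ≤ b := by
      rcases Nat.eq_zero_or_pos b with h0 | h1
      · subst h0; simp at hq; omega
      · exact h1
    have hq1 : 1 ≤ q := by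
      rcases Nat.eq_zero_or_pos q with h0 | h1
      · subst h0; omega
      · exact h1
    have hqb : n / b = q := by rw [hq, Nat.mul_div_cancel_left _ (by omega)]
    rw [hqb]
    have hqb2 : q < b := by nlinarith
    refine ⟨⟨⟨b, by rw [hq, Nat.mul_comm]⟩, hn0⟩, by nlinarith⟩
  · intro a ha
    simp only [Finset.mem_coe, Finset.mem_filter, Nat.mem_divisors] at ha
    exact Nat.div_div_self ha.1.1 ha.1.2
  · intro b hb
    simp only [Finset.mem_coe, Finset.mem_filter, Nat.mem_divisors] at hb
    exact Nat.div_div_self hb.1.1 hb.1.2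

lemma card_divisors_split (n : Nat) (hn : 1 ≤ n) :
    (n.divisors).card
      = 2 * ((n.divisors).filter (fun x => x*x < n)).card
        + ((n.divisors).filter (fun x => x*x = n)).card := by
  have hsplit := Finset.card_filter_add_card_filter_not
    (s := n.divisors) (p := fun x => x*x < n)
  have hrest : (n.divisors).filter (fun x => ¬ x*x < n)
      = (n.divisors).filter (fun x => x*x = n) ∪ (n.divisors).filter (fun x => n < x*x) := by
    ext x
    simp only [Finset.mem_filter, Finset.mem_union]
    constructor
    · rintro ⟨hx, h⟩
      rcases Nat.lt_or_ge n (x*x) with h2 | h2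
      · exact Or.inr ⟨hx, h2⟩
      · exact Or.inl ⟨hx, by omega⟩
    · rintro (⟨hx, h⟩ | ⟨hx, h⟩)
      · exact ⟨hx, by omega⟩
      · exact ⟨hx, by omega⟩
  have hdisj : Disjoint ((n.divisors).filter (fun x => x*x = n))
      ((n.divisors).filter (fun x => n < x*x)) := by
    rw [Finset.disjoint_left]
    intro x hx1 hx2
    simp only [Finset.mem_filter] at hx1 hx2
    omega
  rw [hrest, Finset.card_union_of_disjoint hdisj, ← card_lt_eq_card_gt n hn] at hsplit
  omega

lemma sqrtCount_eq_card (m : Int) (hm : 1 ≤ m) :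
    sqrtCount m 1 0 = ((m.toNat.divisors).card : Int) := by
  rw [sqrtCount_inv m hm (m - 1).toNat 1 0 rfl (le_refl _)]
  have h1 : (1:Int).toNat = 1 := rfl
  have hLt : (m.toNat.divisors).filter (fun x => (1:Int).toNat ≤ x ∧ x*x < m.toNat)
      = (m.toNat.divisors).filter (fun x => x*x < m.toNat) := by
    rw [h1]
    refine Finset.filter_congr ?_
    intro x hx
    have := Nat.pos_of_mem_divisors hx
    constructor
    · rintro ⟨_, h⟩; exact h
    · intro h; exact ⟨this, h⟩
  have hEq : (m.toNat.divisors).filter (fun x => (1:Int).toNat ≤ x ∧ x*x = m.toNat)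
      = (m.toNat.divisors).filter (fun x => x*x = m.toNat) := by
    rw [h1]
    refine Finset.filter_congr ?_
    intro x hx
    have := Nat.pos_of_mem_divisors hx
    constructor
    · rintro ⟨_, h⟩; exact h
    · intro h; exact ⟨this, h⟩
  rw [hLt, hEq, card_divisors_split m.toNat (by omega)]
  push_cast; ring

theorem solve_eq_alt (a b c : Int) : solve a b c = solve_alt a b c := by
  unfold solve solve_alt
  refine PySem.List.foldl_congr_mem _ _ _ _ ?_
  intro t1 i hi
  have hib := (PySem.List.mem_pyRange_one).mp hi
  refine PySem.List.foldl_congr_mem _ _ _ _ ?_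
  intro t2 j hj
  have hjb := (PySem.List.mem_pyRange_one).mp hj
  refine PySem.List.foldl_congr_mem _ _ _ _ ?_
  intro t3 k hk
  have hkb := (PySem.List.mem_pyRange_one).mp hk
  have p1 : (1:Int) ≤ i := hib.1
  have p2 : (1:Int) ≤ j := hjb.1
  have p3 : (1:Int) ≤ k := hkb.1
  have q1 : i ≤ a := by omega
  have q2 : j ≤ b := by omega
  have q3 : k ≤ c := by omega
  have hij1 : (1:Int) ≤ i * j := by
    have := mul_le_mul p1 p2 (by omega) (by omega); simpa using this
  have hlow : (1:Int) ≤ i * j * k := by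
    have := mul_le_mul hij1 p3 (by omega) (by omega); simpa using this
  have hij2 : i * j ≤ a * b := mul_le_mul q1 q2 (by omega) (by omega)
  have hab : (0:Int) ≤ a * b := le_trans (le_trans (by omega) hij1) hij2
  have hup : i * j * k ≤ a * b * c := mul_le_mul hij2 q3 (by omega) hab
  have hpoint : PySem.List.pyGetD (solveTable (a*b*c)) (i*j*k) 0 = sqrtCount (i*j*k) 1 0 := by
    rw [table_getD (a*b*c) (i*j*k) hlow hup, countDivs_eq_card _ hlow, sqrtCount_eq_card _ hlow]
  simp only [hpoint]

-- ===== VERDICT (by name: the statement is the Claim_ definition above) =====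
theorem solve_spec : Claim_equal_solve := by
  intro a b c _ _
  unfold Spec_solve
  exact solve_eq_alt a b c
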